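-- pv_equiv track=rewrite | github.com/OstaSliver/BoardBased_Toc-main | CrawlerDebug..py | _split_array_items_jsonish
-- ===== SOURCE A (Python) =====
-- def _split_array_items_jsonish(array_text: str) -> list[str]:
--     s = array_text.strip()
--     if s.startswith('['): s = s[1:]
--     if s.endswith(']'):   s = s[:-1]
--     parts = []
--     depth = 0; in_str = False; esc = False; obj_start = None
--     for idx, ch in enumerate(s):
--         if in_str:
--             if esc: esc = False
--             elif ch == '\\': esc = True
--             elif ch == '"': in_str = False
--             continue
--         if ch == '"': in_str = True; continue
--         if ch == '{':
--             if depth == 0: obj_start = idx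
--             depth += 1
--         elif ch == '}':
--             depth -= 1
--             if depth == 0 and obj_start is not None:
--                 parts.append(s[obj_start:idx+1]); obj_start = None
--     return parts
-- ===== SOURCE B (Python) =====
-- def _split_array_items_jsonish(array_text: str) -> list[str]:
--     s = array_text.strip()
--     if s.startswith('['): s = s[1:]
--     if s.endswith(']'):   s = s[:-1]
--     # pass 1: mark which characters are structural (outside any string literal;
--     # quote delimiters and everything inside strings are non-structural)
--     structural = []
--     in_str = False; esc = False
--     for ch in s:
--         if in_str:
--             structural.append(False)
--             if esc: esc = False
--             elif ch == '\\': esc = True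
--             elif ch == '"': in_str = False
--         elif ch == '"':
--             structural.append(False)
--             in_str = True
--         else:
--             structural.append(True)
--     # pass 2: brace-depth scan over structural characters only
--     parts = []
--     depth = 0; obj_start = None
--     for idx, ch in enumerate(s):
--         if not structural[idx]:
--             continue
--         if ch == '{':
--             if depth == 0: obj_start = idx
--             depth += 1
--         elif ch == '}':
--             depth -= 1
--             if depth == 0 and obj_start is not None:
--                 parts.append(s[obj_start:idx+1])
--                 obj_start = None
--     return parts
-- ===== Notes on version B (the rewrite author's own statement) =====
-- stated objective: alternative
-- what changed: A's single scanner interleaving string-literal state with brace-depth tracking is split into two passes: a first pass builds a boolean mask of structural characters (outside string literals), and a second brace-depth scan consumes only the masked characters.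
import Mathlib
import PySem

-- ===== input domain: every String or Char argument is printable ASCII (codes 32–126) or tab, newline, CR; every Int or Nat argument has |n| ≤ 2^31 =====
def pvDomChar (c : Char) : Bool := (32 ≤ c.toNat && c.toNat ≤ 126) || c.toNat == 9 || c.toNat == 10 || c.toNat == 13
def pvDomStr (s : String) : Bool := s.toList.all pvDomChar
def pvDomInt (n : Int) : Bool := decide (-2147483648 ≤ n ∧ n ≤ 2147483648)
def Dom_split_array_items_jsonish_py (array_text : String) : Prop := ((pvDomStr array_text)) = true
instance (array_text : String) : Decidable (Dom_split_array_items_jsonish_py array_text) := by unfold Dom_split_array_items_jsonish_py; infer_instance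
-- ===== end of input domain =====

-- B replaces A's single interleaved scanner by two passes (a string-literal mask, then a
-- brace-depth scan over structural characters); objective: alternative decomposition, not speed.

-- ===== PORT A =====
-- strip, drop '['/']' — shared prefix handling (identical in both Pythons)
def pvPrep (array_text : String) : List Char :=
  let s := PySem.Chars.strip array_text.toList
  let s := if PySem.Chars.startswith s ['['] then PySem.List.slice s (some 1) none else s
  if PySem.Chars.endswith s [']'] then PySem.List.slice s none (some (-1)) else s

-- loop state of A: (parts, depth, in_str, esc, obj_start)
def pvStepA (s : List Char) (st : List String × Int × Bool × Bool × Option Int)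
    (p : Int × Char) : List String × Int × Bool × Bool × Option Int :=
  let (parts, depth, in_str, esc, obj_start) := st
  let (idx, ch) := p
  if in_str then
    if esc then (parts, depth, in_str, false, obj_start)
    else if ch = '\\' then (parts, depth, in_str, true, obj_start)
    else if ch = '"' then (parts, depth, false, esc, obj_start)
    else (parts, depth, in_str, esc, obj_start)
  else if ch = '"' then (parts, depth, true, esc, obj_start)
  else if ch = '{' then
    ((parts, depth + 1, in_str, esc, if depth = 0 then some idx else obj_start))
  else if ch = '}' then
    let depth := depth - 1
    if depth = 0 ∧ obj_start.isSome then
      (parts ++ [String.ofList (PySem.List.slice s (some (obj_start.getD 0)) (some (idx + 1)))],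
       depth, in_str, esc, none)
    else (parts, depth, in_str, esc, obj_start)
  else (parts, depth, in_str, esc, obj_start)

def split_array_items_jsonish_py (array_text : String) : List String :=
  let s := pvPrep array_text
  ((PySem.List.enumerate s 0).foldl (pvStepA s) ([], 0, false, false, none)).1

-- ===== PORT B =====
-- pass 1: structural mask (False inside string literals and on quote delimiters)
def pvMask : List Char → Bool → Bool → List Bool
  | [], _, _ => []
  | ch :: rest, in_str, esc =>
    if in_str then
      if esc then false :: pvMask rest true false
      else if ch = '\\' then false :: pvMask rest true true
      else if ch = '"' then false :: pvMask rest false esc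
      else false :: pvMask rest true esc
    else if ch = '"' then false :: pvMask rest true esc
    else true :: pvMask rest false esc

-- pass 2 step: (parts, depth, obj_start); skips non-structural characters
def pvStepB (s : List Char) (st : List String × Int × Option Int)
    (p : (Int × Char) × Bool) : List String × Int × Option Int :=
  let (parts, depth, obj_start) := st
  let ((idx, ch), structural) := p
  if !structural then (parts, depth, obj_start)
  else if ch = '{' then
    (parts, depth + 1, if depth = 0 then some idx else obj_start)
  else if ch = '}' then
    let depth := depth - 1
    if depth = 0 ∧ obj_start.isSome then
      (parts ++ [String.ofList (PySem.List.slice s (some (obj_start.getD 0)) (some (idx + 1)))],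
       depth, none)
    else (parts, depth, obj_start)
  else (parts, depth, obj_start)

def split_array_items_jsonish_py_alt (array_text : String) : List String :=
  let s := pvPrep array_text
  (((PySem.List.enumerate s 0).zip (pvMask s false false)).foldl
      (pvStepB s) ([], 0, none)).1

-- ===== PRECONDITION & SPEC =====
def Spec_split_array_items_jsonish_py (array_text : String) (out : List String) : Prop := out = split_array_items_jsonish_py_alt array_text
instance (array_text : String) (out : List String) : Decidable (Spec_split_array_items_jsonish_py array_text out) := by unfold Spec_split_array_items_jsonish_py; infer_instance

-- ===== CLAIM (what is proved, stated in full; the proofs are below) =====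
def Claim_equal_split_array_items_jsonish_py : Prop := ∀ (array_text : String), Dom_split_array_items_jsonish_py array_text → Spec_split_array_items_jsonish_py array_text (split_array_items_jsonish_py array_text)

-- ===== LEMMAS AND PROOFS =====

-- the one-pass fold of A equals the mask-then-scan composition of B, for any start state
lemma pv_main (s : List Char) : ∀ (cs : List Char) (i : Int) (in_str esc : Bool)
    (parts : List String) (depth : Int) (obj_start : Option Int),
    ((PySem.List.enumerate cs i).foldl (pvStepA s) (parts, depth, in_str, esc, obj_start)).1
      = (((PySem.List.enumerate cs i).zip (pvMask cs in_str esc)).foldl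
          (pvStepB s) (parts, depth, obj_start)).1 := by
  intro cs
  induction cs with
  | nil => intro i in_str esc parts depth obj_start; simp [PySem.List.enumerate_nil, pvMask]
  | cons c rest ih =>
    intro i in_str esc parts depth obj_start
    rw [PySem.List.enumerate_cons]
    cases in_str with
    | true =>
      cases esc with
      | true => simp [pvMask, pvStepA, pvStepB, List.zip, ih]
      | false =>
        by_cases hb : c = '\\'
        · simp [pvMask, pvStepA, pvStepB, hb, List.zip, ih]
        · by_cases hq : c = '"'
          · simp [pvMask, pvStepA, pvStepB, hq, List.zip, ih]
          · simp [pvMask, pvStepA, pvStepB, hb, hq, List.zip, ih]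
    | false =>
      by_cases hq : c = '"'
      · simp [pvMask, pvStepA, pvStepB, hq, List.zip, ih]
      · by_cases ho : c = '{'
        · simp [pvMask, pvStepA, pvStepB, ho, List.zip, ih]
        · by_cases hc : c = '}'
          · by_cases hz : depth - 1 = 0 ∧ obj_start.isSome
            · simp [pvMask, pvStepA, pvStepB, hc, hz, List.zip, ih]
            · simp [pvMask, pvStepA, pvStepB, hc, hz, List.zip, ih]
          · simp [pvMask, pvStepA, pvStepB, hq, ho, hc, List.zip, ih]

-- ===== VERDICT (by name: the statement is the Claim_ definition above) =====
theorem split_array_items_jsonish_py_spec : Claim_equal_split_array_items_jsonish_py := by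
  intro array_text _
  show split_array_items_jsonish_py array_text = split_array_items_jsonish_py_alt array_text
  unfold split_array_items_jsonish_py split_array_items_jsonish_py_alt
  exact pv_main (pvPrep array_text) (pvPrep array_text) 0 false false [] 0 none
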